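-- pv_equiv track=rewrite | github.com/rofiperlungoding/pkm-flu-ml | scripts/advanced_feature_extraction.py | _find_max_charge_cluster
-- ===== SOURCE A (Python) =====
-- def _find_max_charge_cluster(sequence, charge_type):
--     """Find maximum cluster of charged residues"""
--     if charge_type == 'positive':
--         charged = 'KRH'
--     else:
--         charged = 'DE'
--
--     max_cluster = 0
--     current_cluster = 0
--
--     for aa in sequence:
--         if aa in charged:
--             current_cluster += 1
--             max_cluster = max(max_cluster, current_cluster)
--         else:
--             current_cluster = 0
--
--     return max_cluster
-- ===== SOURCE B (Python) =====
-- def _find_max_charge_cluster(sequence, charge_type):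
--     """Find maximum cluster of charged residues (block-scan version)."""
--     charged = 'KRH' if charge_type == 'positive' else 'DE'
--     best = 0
--     i = 0
--     n = len(sequence)
--     while i < n:
--         if sequence[i] in charged:
--             j = i + 1
--             while j < n and sequence[j] in charged:
--                 j += 1
--             if j - i > best:
--                 best = j - i
--             i = j
--         else:
--             i += 1
--     return best
-- ===== Notes on version B (the rewrite author's own statement) =====
-- stated objective: alternative
-- what changed: Replaces the element-wise running-counter-with-max scan by a block scan that locates each maximal run of charged residues, measures it whole, and jumps past it.
import Mathlib
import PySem

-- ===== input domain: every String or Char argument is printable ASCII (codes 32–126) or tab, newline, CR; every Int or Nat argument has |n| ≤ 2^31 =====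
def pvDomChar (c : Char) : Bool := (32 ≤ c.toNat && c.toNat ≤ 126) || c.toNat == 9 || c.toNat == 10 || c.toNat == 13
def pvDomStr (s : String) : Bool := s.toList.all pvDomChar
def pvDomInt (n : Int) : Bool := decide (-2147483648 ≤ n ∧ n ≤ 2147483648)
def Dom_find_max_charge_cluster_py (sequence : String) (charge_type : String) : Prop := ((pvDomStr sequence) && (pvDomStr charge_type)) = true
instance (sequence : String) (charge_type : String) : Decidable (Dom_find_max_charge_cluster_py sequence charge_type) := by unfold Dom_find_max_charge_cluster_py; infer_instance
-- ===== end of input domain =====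

-- B replaces A's element-wise running-counter scan by a block scan over maximal charged runs (alternative decomposition, same cost).


-- ===== PORT A =====
-- A's for-loop over the sequence with state (max_cluster, current_cluster), as structural recursion
def pvA_loop (charged : List Char) (max_cluster current_cluster : Int) : List Char → Int
  | [] => max_cluster
  | aa :: rest =>
    if charged.contains aa then
      pvA_loop charged (max max_cluster (current_cluster + 1)) (current_cluster + 1) rest
    else
      pvA_loop charged max_cluster 0 rest

def find_max_charge_cluster_py (sequence : String) (charge_type : String) : Int :=
  let charged : List Char := if charge_type = "positive" then ['K', 'R', 'H'] else ['D', 'E']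
  pvA_loop charged 0 0 sequence.toList

-- ===== PORT B =====
-- B's outer while-loop: on a charged position measure the whole maximal run (inner scan = takeWhile)
-- and jump past it (i = j, i.e. recurse on dropWhile); otherwise advance one position.
def pvB_go (charged : List Char) : List Char → Int
  | [] => 0
  | c :: rest =>
    if charged.contains c then
      max (((rest.takeWhile (fun a => charged.contains a)).length : Int) + 1)
          (pvB_go charged (rest.dropWhile (fun a => charged.contains a)))
    else pvB_go charged rest
termination_by l => l.length
decreasing_by
  · exact Nat.lt_succ_of_le (List.length_dropWhile_le _ _)
  · exact Nat.lt_succ_self _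

def find_max_charge_cluster_py_alt (sequence : String) (charge_type : String) : Int :=
  let charged : List Char := if charge_type = "positive" then ['K', 'R', 'H'] else ['D', 'E']
  pvB_go charged sequence.toList

-- ===== PRECONDITION & SPEC =====
def Spec_find_max_charge_cluster_py (sequence : String) (charge_type : String) (out : Int) : Prop := out = find_max_charge_cluster_py_alt sequence charge_type
instance (sequence : String) (charge_type : String) (out : Int) : Decidable (Spec_find_max_charge_cluster_py sequence charge_type out) := by unfold Spec_find_max_charge_cluster_py; infer_instance

-- ===== CLAIM (what is proved, stated in full; the proofs are below) =====
def Claim_equal_find_max_charge_cluster_py : Prop := ∀ (sequence : String) (charge_type : String), Dom_find_max_charge_cluster_py sequence charge_type → Spec_find_max_charge_cluster_py sequence charge_type (find_max_charge_cluster_py sequence charge_type)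

-- ===== LEMMAS AND PROOFS =====

-- proof-only helper: best cluster reachable in l when the current run already has credit c
def pvF (charged : List Char) (c : Int) : List Char → Int
  | [] => 0
  | x :: rest =>
    if charged.contains x then max (c + 1) (pvF charged (c + 1) rest)
    else pvF charged 0 rest

theorem pvF_nonneg (charged : List Char) (l : List Char) :
    ∀ c : Int, 0 ≤ c → 0 ≤ pvF charged c l := by
  induction l with
  | nil => intro c _; simp [pvF]
  | cons x rest ih =>
    intro c hc
    simp only [pvF]
    split
    · exact le_max_of_le_left (by omega)
    · exact ih 0 le_rfl

theorem pvA_loop_eq (charged : List Char) (l : List Char) :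
    ∀ m c : Int, 0 ≤ m → pvA_loop charged m c l = max m (pvF charged c l) := by
  induction l with
  | nil =>
    intro m c hm
    simp [pvA_loop, pvF]
    omega
  | cons x rest ih =>
    intro m c hm
    simp only [pvA_loop, pvF]
    split
    · rw [ih _ _ (by omega)]
      rw [max_assoc]
    · exact ih _ _ hm

theorem pvF_shift (charged : List Char) (l : List Char) :
    ∀ c : Int, max c (pvF charged c l) =
      max (c + ((l.takeWhile (fun a => charged.contains a)).length : Int))
          (pvF charged 0 (l.dropWhile (fun a => charged.contains a))) := by
  induction l with
  | nil => intro c; simp [pvF]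
  | cons x rest ih =>
    intro c
    by_cases h : x ∈ charged
    · simp only [pvF, List.takeWhile_cons, List.dropWhile_cons, List.contains_eq_mem, h,
        decide_true, if_pos, List.length_cons]
      rw [← max_assoc, max_eq_right (by omega : c ≤ c + 1), ih (c + 1)]
      push_cast
      ring_nf
      simp [List.contains_eq_mem]
    · simp [pvF, List.contains_eq_mem, h]

theorem pvF_eq_go (charged : List Char) : ∀ n (l : List Char), l.length ≤ n →
    pvF charged 0 l = pvB_go charged l := by
  intro n
  induction n with
  | zero =>
    intro l hl
    have : l = [] := List.eq_nil_of_length_eq_zero (Nat.le_zero.mp hl)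
    simp [this, pvF, pvB_go]
  | succ n ih =>
    intro l hl
    match l with
    | [] => simp [pvF, pvB_go]
    | x :: rest =>
      by_cases h : x ∈ charged
      · have hlen : rest.length ≤ n := by simpa using hl
        rw [pvF, pvB_go]
        simp only [List.contains_eq_mem, h, decide_true, if_pos]
        rw [show (fun a => decide (a ∈ charged)) = (fun a => charged.contains a) from by
          funext a; simp [List.contains_eq_mem]]
        have h2 := pvF_shift charged rest 1
        have h3 : max (1 : Int) (pvF charged 1 rest) =
            max (1 + ((rest.takeWhile (fun a => charged.contains a)).length : Int))
                (pvF charged 0 (rest.dropWhile (fun a => charged.contains a))) := h2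
        have h4 : pvF charged 0 (rest.dropWhile (fun a => charged.contains a)) =
            pvB_go charged (rest.dropWhile (fun a => charged.contains a)) :=
          ih _ (le_trans (List.length_dropWhile_le _ _) hlen)
        calc max (0 + 1 : Int) (pvF charged (0 + 1) rest)
            = max (1 : Int) (pvF charged 1 rest) := by norm_num
          _ = max (1 + ((rest.takeWhile (fun a => charged.contains a)).length : Int))
                (pvF charged 0 (rest.dropWhile (fun a => charged.contains a))) := h3
          _ = max (((rest.takeWhile (fun a => charged.contains a)).length : Int) + 1)
                (pvB_go charged (rest.dropWhile (fun a => charged.contains a))) := by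
                rw [h4, add_comm]
      · have hlen : rest.length ≤ n := by simpa using hl
        rw [pvF, pvB_go]
        simp only [List.contains_eq_mem, h, decide_false, Bool.false_eq_true, if_false]
        exact ih rest hlen

-- ===== VERDICT (by name: the statement is the Claim_ definition above) =====
theorem find_max_charge_cluster_py_spec : Claim_equal_find_max_charge_cluster_py := by
  intro sequence charge_type _
  unfold Spec_find_max_charge_cluster_py find_max_charge_cluster_py find_max_charge_cluster_py_alt
  set charged : List Char := if charge_type = "positive" then ['K', 'R', 'H'] else ['D', 'E'] with hch
  rw [pvA_loop_eq charged _ 0 0 le_rfl,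
      max_eq_right (pvF_nonneg charged _ 0 le_rfl),
      pvF_eq_go charged sequence.toList.length sequence.toList le_rfl]
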